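-- pv_equiv track=rewrite | github.com/cookies8710/game-of-life-bg | game_of_life.py | stretch
-- ===== SOURCE A (Python) =====
-- from functools import reduce
-- import operator
--
-- def stretch(array, w, h):
--   # stretches 2D 'array' to 'w' x 'h' by copying as much as it can and padding the rest with zeros
--   aw, ah = len(array[0]), len(array)
--   mw, mh = w // aw, h // ah
--
--   def mul(arr, n):
--       # multiplies elements of 'arr' by 'n' e.g. mul([1,2,3], 2) yields [1,1,2,2,3,3]
--      return reduce(operator.add, [[x] * n for x in arr])
--
--   def pad(src, unit, target):
--       # pads 'src' to match target 'width' using 'unit'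
--       current = len(src)
--       padding = target - current
--       pad1 = padding // 2
--       pad2 = padding - pad1
--       return unit * pad1 + src + unit * pad2
--
--   return pad(mul([pad(mul(row, mw), [0], w) for row in array], mh), [[0] * w], h)
-- ===== SOURCE B (Python) =====
-- def stretch(array, w, h):
--   # stretches 2D 'array' to 'w' x 'h' by copying as much as it can and padding the rest with zeros
--   # alternative decomposition: picks each output cell/row by index arithmetic (row[j // mw],
--   # outrows[i // mh]) instead of concatenating repeated sublists
--   aw, ah = len(array[0]), len(array)
--   mw, mh = w // aw, h // ah
--   def center(content, zero, target):
--       left = (target - len(content)) // 2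
--       right = target - len(content) - left
--       return [zero] * left + content + [zero] * right
--   def row_out(row):
--       stretched = [row[j // mw] for j in range(len(row) * mw)]
--       return center(stretched, 0, w)
--   outrows = [row_out(row) for row in array]
--   rows = [outrows[i // mh] for i in range(ah * mh)]
--   return center(rows, [0] * w, h)
-- ===== Notes on version B (the rewrite author's own statement) =====
-- stated objective: alternative
-- what changed: B selects each output cell by index arithmetic (element j of a stretched row is row[j // mw]; output row i is the cached stretched row outrows[i // mh]) with one centering helper, instead of A's reduce(operator.add) concatenation of repeated sublists in nested mul/pad calls.
import Mathlib
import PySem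

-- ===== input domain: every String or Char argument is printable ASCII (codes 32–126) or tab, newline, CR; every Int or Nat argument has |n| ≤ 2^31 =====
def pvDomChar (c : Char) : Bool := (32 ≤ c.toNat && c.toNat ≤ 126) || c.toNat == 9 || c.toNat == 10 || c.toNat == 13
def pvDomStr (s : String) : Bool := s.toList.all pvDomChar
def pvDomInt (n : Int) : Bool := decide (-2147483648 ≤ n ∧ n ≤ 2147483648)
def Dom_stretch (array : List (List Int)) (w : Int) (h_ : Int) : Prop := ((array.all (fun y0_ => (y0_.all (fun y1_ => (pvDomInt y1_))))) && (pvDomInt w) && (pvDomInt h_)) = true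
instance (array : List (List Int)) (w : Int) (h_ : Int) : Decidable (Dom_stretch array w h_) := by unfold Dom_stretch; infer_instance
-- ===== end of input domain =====

-- B builds each output cell by index arithmetic instead of A's reduce-concatenation of
-- repeated sublists (objective: alternative decomposition, same asymptotic cost).

-- ===== PORT A =====

-- Python 'lst * n' for a list and an int (negative n gives [], as in Python)
def pyListMul {α : Type} (l : List α) (n : Int) : List α :=
  (List.replicate n.toNat l).flatten

-- mul(arr, n) = reduce(operator.add, [[x] * n for x in arr])
def pyMulA {α : Type} (arr : List α) (n : Int) : List α :=
  match arr.map (fun x => pyListMul [x] n) with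
  | [] => []            -- Python: reduce raises TypeError here (excluded by Pre_stretch)
  | hd :: tl => tl.foldl (· ++ ·) hd

-- pad(src, unit, target)
def pyPadA {α : Type} (src unit : List α) (target : Int) : List α :=
  let current : Int := (src.length : Int)
  let padding := target - current
  let pad1 := PySem.Int.floordiv padding 2
  let pad2 := padding - pad1
  pyListMul unit pad1 ++ src ++ pyListMul unit pad2

def stretch (array : List (List Int)) (w : Int) (h_ : Int) : List (List Int) :=
  let aw : Int := ((array.headD []).length : Int)   -- array[0]: IndexError on [] excluded by Pre_
  let ah : Int := (array.length : Int)
  let mw := PySem.Int.floordiv w aw                 -- ZeroDivisionError excluded by Pre_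
  let mh := PySem.Int.floordiv h_ ah
  pyPadA (pyMulA (array.map (fun row => pyPadA (pyMulA row mw) [(0 : Int)] w)) mh)
    [List.replicate w.toNat (0 : Int)] h_

-- ===== PORT B =====

-- center(content, zero, target)
def centerB {α : Type} (content : List α) (zero : α) (target : Int) : List α :=
  let left := PySem.Int.floordiv (target - (content.length : Int)) 2
  let right := target - (content.length : Int) - left
  List.replicate left.toNat zero ++ content ++ List.replicate right.toNat zero

-- row_out(row): stretched = [row[j // mw] for j in range(len(row) * mw)]; center it to w
def rowOutB (mw w : Int) (row : List Int) : List Int :=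
  let stretched := (PySem.List.pyRange 0 ((row.length : Int) * mw) 1).map
    (fun j => (PySem.List.pyGet? row (PySem.Int.floordiv j mw)).getD 0)
  centerB stretched 0 w

def stretch_alt (array : List (List Int)) (w : Int) (h_ : Int) : List (List Int) :=
  let aw : Int := ((array.headD []).length : Int)
  let ah : Int := (array.length : Int)
  let mw := PySem.Int.floordiv w aw
  let mh := PySem.Int.floordiv h_ ah
  let outrows := array.map (fun row => rowOutB mw w row)
  let rows := (PySem.List.pyRange 0 (ah * mh) 1).map
    (fun i => (PySem.List.pyGet? outrows (PySem.Int.floordiv i mh)).getD [])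
  centerB rows (List.replicate w.toNat (0 : Int)) h_

-- ===== PRECONDITION & SPEC =====
-- Pre_ excludes exactly the inputs on which Python A raises: the empty array (IndexError),
-- and any array containing an empty row (ZeroDivisionError if it is the first row,
-- TypeError from reduce over an empty sequence otherwise).
def Pre_stretch (array : List (List Int)) (w : Int) (h_ : Int) : Prop :=
  array ≠ [] ∧ ∀ row ∈ array, row ≠ []
instance (array : List (List Int)) (w : Int) (h_ : Int) : Decidable (Pre_stretch array w h_) := by
  unfold Pre_stretch; infer_instance
def pvWitness_stretch : List (List Int) × Int × Int := ([[1]], 2, 2)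

def Spec_stretch (array : List (List Int)) (w : Int) (h_ : Int) (out : List (List Int)) : Prop := out = stretch_alt array w h_
instance (array : List (List Int)) (w : Int) (h_ : Int) (out : List (List Int)) : Decidable (Spec_stretch array w h_ out) := by unfold Spec_stretch; infer_instance

-- ===== CLAIM (what is proved, stated in full; the proofs are below) =====
def Claim_equal_stretch : Prop := ∀ (array : List (List Int)) (w : Int) (h_ : Int), Dom_stretch array w h_ → Pre_stretch array w h_ → Spec_stretch array w h_ (stretch array w h_)

-- ===== LEMMAS AND PROOFS =====


theorem nat_core {α β : Type} (m : Nat) (hm : 0 < m) (d : α) (g : α → β) :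
    ∀ (l : List α), (List.range (l.length * m)).map (fun j => g ((l[j / m]?).getD d))
      = (l.map (fun x => List.replicate m (g x))).flatten := by
  intro l
  induction l with
  | nil => simp
  | cons x tl ih =>
    have hlen : (x :: tl).length * m = m + tl.length * m := by
      simp [List.length_cons]; ring
    rw [hlen, List.range_add, List.map_append, List.map_map]
    have h1 : (List.range m).map (fun j => g (((x :: tl)[j / m]?).getD d))
        = List.replicate m (g x) := by
      rw [List.map_congr_left (g := fun _ => g x) ?_, List.map_const', List.length_range]
      intro j hj
      rw [Nat.div_eq_of_lt (List.mem_range.mp hj)]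
      rfl
    have h2 : (List.range (tl.length * m)).map ((fun j => g (((x :: tl)[j / m]?).getD d)) ∘ (fun j => m + j))
        = (tl.map (fun x => List.replicate m (g x))).flatten := by
      rw [← ih]
      apply List.map_congr_left
      intro j _
      have : (m + j) / m = j / m + 1 := by
        rw [Nat.add_comm, Nat.add_div_right _ hm]
      simp [Function.comp, this]
    rw [h1, h2]
    simp

theorem range_div_map_eq_flatten {α β : Type} (l : List α) (m : Int) (d : α) (g : α → β) :
    (PySem.List.pyRange 0 ((l.length : Int) * m) 1).map
      (fun j => g ((PySem.List.pyGet? l (PySem.Int.floordiv j m)).getD d))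
    = (l.map (fun x => List.replicate m.toNat (g x))).flatten := by
  rcases (by omega : m ≤ 0 ∨ 0 < m) with hm | hm
  · have h0 : ((l.length : Int) * m) ≤ 0 :=
      mul_nonpos_of_nonneg_of_nonpos (by positivity) hm
    rw [PySem.List.pyRange_one_eq_nil h0]
    have : m.toNat = 0 := Int.toNat_of_nonpos hm
    simp [this]
  · have hmn : m = (m.toNat : Int) := (Int.toNat_of_nonneg hm.le).symm
    have hlen : ((l.length : Int) * m).toNat = l.length * m.toNat := by
      rw [hmn]; exact_mod_cast Int.toNat_natCast _
    rw [PySem.List.pyRange_one, List.map_map]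
    simp only [sub_zero, hlen]
    refine Eq.trans (List.map_congr_left ?_) (nat_core m.toNat (by omega) d g l)
    intro k _
    simp only [Function.comp_apply, zero_add]
    rw [show PySem.Int.floordiv (k : Int) m = ((k / m.toNat : Nat) : Int) by
          rw [hmn]; exact PySem.Int.floordiv_natCast k m.toNat,
        PySem.List.pyGet?_natCast]

-- reduce(add) of the mapped list is its flatten ([] agrees with flatten [] too)
theorem foldl_append_eq_append_flatten {α : Type} (l : List (List α)) (init : List α) :
    l.foldl (· ++ ·) init = init ++ l.flatten := by
  induction l generalizing init with
  | nil => simp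
  | cons hd tl ih => simp [ih, List.append_assoc]

theorem pyMulA_eq_flatten {α : Type} (arr : List α) (n : Int) :
    pyMulA arr n = (arr.map (fun x => pyListMul [x] n)).flatten := by
  cases arr with
  | nil => rfl
  | cons x tl => simp [pyMulA, foldl_append_eq_append_flatten]

theorem pyListMul_singleton {α : Type} (x : α) (n : Int) :
    pyListMul [x] n = List.replicate n.toNat x := by
  unfold pyListMul
  induction n.toNat with
  | zero => rfl
  | succ k ih => simp_all [List.replicate_succ]

-- pad with a singleton unit is exactly centerB
theorem pyPadA_singleton {α : Type} (src : List α) (u : α) (t : Int) :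
    pyPadA src [u] t = centerB src u t := by
  simp [pyPadA, centerB, pyListMul_singleton]

-- A's horizontally stretched-and-padded row equals B's row_out
theorem rowOutA_eq (mw w : Int) (row : List Int) :
    pyPadA (pyMulA row mw) [(0 : Int)] w = rowOutB mw w row := by
  rw [pyPadA_singleton, rowOutB]
  congr 1
  have h := range_div_map_eq_flatten row mw (0 : Int) (id : Int → Int)
  simp only [id] at h
  rw [h, pyMulA_eq_flatten]
  simp [pyListMul_singleton]

theorem stretch_eq (array : List (List Int)) (w h_ : Int) :
    stretch array w h_ = stretch_alt array w h_ := by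
  simp only [stretch, stretch_alt]
  have h := range_div_map_eq_flatten
      (array.map (fun row => rowOutB (PySem.Int.floordiv w ((array.headD []).length : Int)) w row))
      (PySem.Int.floordiv h_ (array.length : Int)) [] (id : List Int → List Int)
  simp only [id, List.length_map, List.map_map] at h
  rw [h, pyPadA_singleton, pyMulA_eq_flatten, List.map_map]
  congr 1
  congr 1
  apply List.map_congr_left
  intro row _
  simp [Function.comp, pyListMul_singleton, rowOutA_eq]

-- ===== VERDICT (by name: the statement is the Claim_ definition above) =====
theorem stretch_spec : Claim_equal_stretch := by
  intro array w h_ _ _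
  unfold Spec_stretch
  exact stretch_eq array w h_
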